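-- pv_equiv track=rewrite | github.com/YukimuraChieri/Rubik_Cube_Robot | catkin_ws/src/central_proc/src/cube_read_exec.py | facePack
-- ===== SOURCE A (Python) =====
-- def facePack(face_list):
--     # 六面字符串
--     six_face_str = ""
--     # 六面顺序：U R F D L B
--     six_face_list = [None, None, None, None, None, None]
--
--     # 遍历传入参数的列表，将面添加到six_face_list相应位置
--     for face in face_list:
--         if face[4] == 'U':
--             six_face_list[0] = face
--         elif face[4] == 'R':
--             six_face_list[1] = face
--         elif face[4] == 'F':
--             six_face_list[2] = face
--         elif face[4] == 'D':
--             six_face_list[3] = face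
--         elif face[4] == 'L':
--             six_face_list[4] = face
--         elif face[4] == 'B':
--             six_face_list[5] = face
--
--     # 再遍历six_face_list，将六面合成为一个字符串
--     for face in six_face_list:
--         if face != None:
--             six_face_str += face
--         else:
--             six_face_str += "XXXXXXXXX"
--
--     return six_face_str
-- ===== SOURCE B (Python) =====
-- def facePack(face_list):
--     def find(c):
--         for face in reversed(face_list):
--             if face[4] == c:
--                 return face
--         return "XXXXXXXXX"
--     return "".join(find(c) for c in "URFDLB")
-- ===== Notes on version B (the rewrite author's own statement) =====
-- stated objective: alternative
-- what changed: A makes one pass over the input dispatching each face via a six-way if/elif into a positional slot list and then scans the slots; B builds no index at all: it is output-driven, scanning face_list from the back once per canonical center in "URFDLB" and taking the first (= last-wins) matching face, defaulting to "XXXXXXXXX".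
import Mathlib
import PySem

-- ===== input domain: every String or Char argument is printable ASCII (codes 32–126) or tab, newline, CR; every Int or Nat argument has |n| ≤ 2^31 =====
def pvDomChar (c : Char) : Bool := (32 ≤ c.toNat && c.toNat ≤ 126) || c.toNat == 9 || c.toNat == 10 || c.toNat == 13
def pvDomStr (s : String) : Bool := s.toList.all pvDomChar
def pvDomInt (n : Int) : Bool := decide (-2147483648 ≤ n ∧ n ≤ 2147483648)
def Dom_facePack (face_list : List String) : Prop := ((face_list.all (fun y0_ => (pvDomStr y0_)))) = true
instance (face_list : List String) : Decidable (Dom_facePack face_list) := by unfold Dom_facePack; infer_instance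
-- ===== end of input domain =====

-- B drops A's six-way dispatch into positional slots: it is output-driven, scanning the
-- list from the back once per canonical center (first match from the back = A's last-wins);
-- an alternative decomposition of the same cost.

-- ===== PORT A =====
-- the body of A's for-loop: the if/elif chain writing into the positional slot list
def facePackUpd (slots : List (Option String)) (face : String) : List (Option String) :=
  match PySem.Str.pyGet? face 4 with          -- face[4]; none = IndexError (excluded by Pre_)
  | none => slots
  | some c =>
    if c = 'U' then PySem.List.pySetD slots 0 (some face)
    else if c = 'R' then PySem.List.pySetD slots 1 (some face)
    else if c = 'F' then PySem.List.pySetD slots 2 (some face)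
    else if c = 'D' then PySem.List.pySetD slots 3 (some face)
    else if c = 'L' then PySem.List.pySetD slots 4 (some face)
    else if c = 'B' then PySem.List.pySetD slots 5 (some face)
    else slots

def facePack (face_list : List String) : String :=
  let six_face_list := face_list.foldl facePackUpd [none, none, none, none, none, none]
  -- second loop: six_face_str += face  /  += "XXXXXXXXX"  (string build done on List Char; exact)
  String.ofList (six_face_list.foldl
    (fun acc o => match o with
      | some face => acc ++ face.toList
      | none => acc ++ "XXXXXXXXX".toList) [])

-- ===== PORT B =====
-- Source B's inner `find`: first face (in the given, already reversed, list) whose center is c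
def facePackFind (c : Char) : List String → String
  | [] => "XXXXXXXXX"
  | f :: rest => if PySem.Str.pyGet? f 4 = some c then f else facePackFind c rest

def facePack_alt (face_list : List String) : String :=
  PySem.Str.join "" ("URFDLB".toList.map (fun c => facePackFind c face_list.reverse))

-- ===== PRECONDITION & SPEC =====
-- Pre_ excludes exactly the inputs where Python A raises IndexError: a face shorter than 5 characters.
def Pre_facePack (face_list : List String) : Prop := ∀ f ∈ face_list, 5 ≤ f.toList.length
instance (face_list : List String) : Decidable (Pre_facePack face_list) := by unfold Pre_facePack; infer_instance
def pvWitness_facePack : List String := ["rrrUrrrrr", "fffFf"]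
def Spec_facePack (face_list : List String) (out : String) : Prop := out = facePack_alt face_list
instance (face_list : List String) (out : String) : Decidable (Spec_facePack face_list out) := by unfold Spec_facePack; infer_instance

-- ===== CLAIM (what is proved, stated in full; the proofs are below) =====
def Claim_equal_facePack : Prop := ∀ (face_list : List String), Dom_facePack face_list → Pre_facePack face_list → Spec_facePack face_list (facePack face_list)

-- ===== LEMMAS AND PROOFS =====

-- first match (as an Option) in a list of faces; proof-only helper characterising both ports
def facePackSearch? (c : Char) : List String → Option String
  | [] => none
  | f :: rest => if PySem.Str.pyGet? f 4 = some c then some f else facePackSearch? c rest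

lemma find_eq_search (c : Char) (l : List String) :
    facePackFind c l = (facePackSearch? c l).getD "XXXXXXXXX" := by
  induction l with
  | nil => rfl
  | cons f rest ih =>
    simp only [facePackFind, facePackSearch?]
    split_ifs <;> simp [ih]

lemma search_append (c : Char) (xs ys : List String) :
    facePackSearch? c (xs ++ ys) = (facePackSearch? c xs).or (facePackSearch? c ys) := by
  induction xs with
  | nil => rfl
  | cons f rest ih =>
    simp only [List.cons_append, facePackSearch?]
    split_ifs <;> simp [ih]

-- loop invariant: A's slot list = last-match-from-the-back search, with the initial slot as fallback
lemma facePack_loop (fl : List String) (sU sR sF sD sL sB : Option String) :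
    fl.foldl facePackUpd [sU, sR, sF, sD, sL, sB] =
      [(facePackSearch? 'U' fl.reverse).or sU,
       (facePackSearch? 'R' fl.reverse).or sR,
       (facePackSearch? 'F' fl.reverse).or sF,
       (facePackSearch? 'D' fl.reverse).or sD,
       (facePackSearch? 'L' fl.reverse).or sL,
       (facePackSearch? 'B' fl.reverse).or sB] := by
  induction fl generalizing sU sR sF sD sL sB with
  | nil => simp [facePackSearch?]
  | cons f rest ih =>
    simp only [List.foldl_cons, List.reverse_cons, search_append]
    have hsingle : ∀ c : Char, facePackSearch? c [f] =
        if PySem.List.pyGet? f.toList 4 = some c then some f else none := by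
      intro c
      simp [facePackSearch?, PySem.Str.pyGet?_eq, PySem.Chars.pyGet?_eq_listPyGet?]
    cases hg : PySem.List.pyGet? f.toList 4 with
    | none =>
      simp only [facePackUpd, PySem.Str.pyGet?_eq, PySem.Chars.pyGet?_eq_listPyGet?, hg]
      rw [ih]
      simp [hsingle, hg]
    | some c =>
      simp only [facePackUpd, PySem.Str.pyGet?_eq, PySem.Chars.pyGet?_eq_listPyGet?, hg]
      split_ifs with hU hR hF hD hL hB <;>
        simp_all [PySem.List.pySetD, PySem.List.pySet?, PySem.List.pyIdx?, ih,
          hsingle, Option.or_assoc]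

-- ===== VERDICT (by name: the statement is the Claim_ definition above) =====
theorem facePack_spec : Claim_equal_facePack := by
  intro fl _ _
  unfold Spec_facePack facePack facePack_alt
  rw [facePack_loop fl none none none none none none]
  simp only [Option.or_none, find_eq_search]
  apply String.ext
  simp [PySem.Str.join, PySem.Chars.join, List.intercalate]
  cases facePackSearch? 'U' fl.reverse <;> cases facePackSearch? 'R' fl.reverse <;>
    cases facePackSearch? 'F' fl.reverse <;> cases facePackSearch? 'D' fl.reverse <;>
    cases facePackSearch? 'L' fl.reverse <;> cases facePackSearch? 'B' fl.reverse <;> simp
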